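-- pv_equiv track=rewrite | github.com/luhoan/jsonlibgen | fetch.py | paginate_text
-- ===== SOURCE A (Python) =====
-- CHARS_PER_PAGE = 1200
--
-- def paginate_text(text):
--     if not text: return []
--     paragraphs = text.split('\n\n')
--     pages = []
--     current_page_html = ""
--     current_length = 0
--
--     for para in paragraphs:
--         para = para.strip()
--         if not para: continue
--         para_html = f"<p>{para}</p>"
--         para_len = len(para)
--
--         if (current_length + para_len > CHARS_PER_PAGE) and (current_length > 0):
--             pages.append(current_page_html)
--             current_page_html = para_html
--             current_length = para_len
--         else:
--             current_page_html += para_html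
--             current_length += para_len
--
--     if current_page_html:
--         pages.append(current_page_html)
--     return pages
-- ===== SOURCE B (Python) =====
-- CHARS_PER_PAGE = 1200
--
-- def paginate_text(text):
--     # Phase 1: the clean paragraph list.
--     paras = [p for p in (q.strip() for q in text.split('\n\n')) if p]
--
--     # Phase 2: recursively peel off one page at a time: each page is the
--     # maximal prefix of remaining paragraphs (at least one) whose total
--     # stripped length stays within CHARS_PER_PAGE.
--     def pages(ps):
--         if not ps:
--             return []
--         total = len(ps[0])
--         k = 1
--         while k < len(ps) and total + len(ps[k]) <= CHARS_PER_PAGE: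
--             total += len(ps[k])
--             k += 1
--         return [''.join(f'<p>{p}</p>' for p in ps[:k])] + pages(ps[k:])
--
--     return pages(paras)
-- ===== Notes on version B (the rewrite author's own statement) =====
-- stated objective: alternative
-- what changed: B replaces A's single stateful pass (running HTML string + running length with an inline break test) by first extracting the stripped non-empty paragraph list and then recursively peeling off pages, each page being the maximal prefix of remaining paragraphs that fits CHARS_PER_PAGE, rendered from its slice.
import Mathlib
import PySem

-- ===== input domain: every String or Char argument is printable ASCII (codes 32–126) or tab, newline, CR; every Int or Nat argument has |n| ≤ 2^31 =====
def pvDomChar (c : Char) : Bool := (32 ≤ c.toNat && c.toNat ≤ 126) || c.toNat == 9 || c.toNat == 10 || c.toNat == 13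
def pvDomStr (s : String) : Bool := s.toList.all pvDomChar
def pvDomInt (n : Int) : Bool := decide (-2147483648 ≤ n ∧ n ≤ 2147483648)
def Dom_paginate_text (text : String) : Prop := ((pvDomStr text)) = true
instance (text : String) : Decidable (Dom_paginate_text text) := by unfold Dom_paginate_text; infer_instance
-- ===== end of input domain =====

-- B pre-extracts the stripped non-empty paragraphs and then recursively peels off pages,
-- each page the maximal fitting prefix of the remaining paragraphs; alternative decomposition, same cost.

-- ===== PORT A =====
def pvPageStep (st : List String × String × Int) (para0 : String) : List String × String × Int :=
  let para := PySem.Str.strip para0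
  if para = "" then st
  else
    let pages := st.1
    let cur := st.2.1
    let curLen := st.2.2
    let paraHtml := "<p>" ++ para ++ "</p>"
    let paraLen := PySem.Str.len para
    if curLen + paraLen > 1200 ∧ curLen > 0 then
      (pages ++ [cur], paraHtml, paraLen)
    else
      (pages, cur ++ paraHtml, curLen + paraLen)

def paginate_text (text : String) : List String :=
  if text = "" then []
  else
    let st := ((PySem.Str.split? text "\n\n").getD []).foldl pvPageStep ([], "", 0)
    if st.2.1 ≠ "" then st.1 ++ [st.2.1] else st.1

-- ===== PORT B =====
def pvHtml (p : String) : String := "<p>" ++ p ++ "</p>"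

-- the while loop counting how many further paragraphs still fit (accumulating total)
def pvFit (total : Int) : List String → Nat
  | [] => 0
  | p :: rest =>
      if total + PySem.Str.len p ≤ 1200 then 1 + pvFit (total + PySem.Str.len p) rest
      else 0

def pvRender (g : List String) : String := PySem.Str.join "" (g.map pvHtml)

-- ps[:k] / ps[k:] with 0 ≤ k are exactly take/drop
def pvPages : List String → List String
  | [] => []
  | p :: rest =>
      let k := pvFit (PySem.Str.len p) rest
      pvRender (p :: rest.take k) :: pvPages (rest.drop k)
termination_by l => l.length
decreasing_by simp only [List.length_drop, List.length_cons]; omega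

def paginate_text_alt (text : String) : List String :=
  pvPages ((((PySem.Str.split? text "\n\n").getD []).map PySem.Str.strip).filter (fun p => p ≠ ""))

-- ===== PRECONDITION & SPEC =====
def Spec_paginate_text (text : String) (out : List String) : Prop := out = paginate_text_alt text
instance (text : String) (out : List String) : Decidable (Spec_paginate_text text out) := by unfold Spec_paginate_text; infer_instance

-- ===== CLAIM (what is proved, stated in full; the proofs are below) =====
def Claim_equal_paginate_text : Prop := ∀ (text : String), Dom_paginate_text text → Spec_paginate_text text (paginate_text text)

-- ===== LEMMAS AND PROOFS =====

-- A's fold, restricted to an already-stripped non-empty paragraph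
def pvStep (st : List String × String × Int) (para : String) : List String × String × Int :=
  let pLen := PySem.Str.len para
  if st.2.2 + pLen > 1200 ∧ st.2.2 > 0 then
    (st.1 ++ [st.2.1], pvHtml para, pLen)
  else
    (st.1, st.2.1 ++ pvHtml para, st.2.2 + pLen)

def pvFin (st : List String × String × Int) : List String :=
  if st.2.1 ≠ "" then st.1 ++ [st.2.1] else st.1

theorem pvJoinNilEq (l : List (List Char)) : PySem.Chars.join [] l = l.flatten := by
  induction l with
  | nil => simp [PySem.Chars.join_nil]
  | cons p rest ih =>
    cases rest with
    | nil => simp [PySem.Chars.join_singleton]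
    | cons q r => simp [PySem.Chars.join_cons_cons, ih]

theorem pvRenderAppend (a b : List String) :
    pvRender (a ++ b) = pvRender a ++ pvRender b := by
  rw [← String.toList_inj]
  simp [pvRender, PySem.Str.toList_join, pvJoinNilEq, String.toList_append]

theorem pvRenderSingleton (p : String) : pvRender [p] = pvHtml p := by
  rw [← String.toList_inj]
  simp [pvRender, PySem.Str.toList_join, pvHtml]

theorem pvRenderNeEmpty (g : List String) (h : g ≠ []) : pvRender g ≠ "" := by
  cases g with
  | nil => exact absurd rfl h
  | cons p rest =>
    intro he
    have hn : (pvRender (p :: rest)).toList = [] := by rw [he]; rfl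
    rw [pvRender, PySem.Str.toList_join, show ("" : String).toList = [] from rfl,
        pvJoinNilEq] at hn
    simp [pvHtml, String.toList_append] at hn

theorem pvLenPos (s : String) (h : s ≠ "") : 1 ≤ PySem.Str.len s := by
  rw [PySem.Str.len_eq]
  have hne : s.toList ≠ [] := by
    intro he; apply h; rw [← String.toList_inj, he]; rfl
  cases hl : s.toList with
  | nil => exact absurd hl hne
  | cons c cs => simp

theorem pvPageStep_eq (st : List String × String × Int) (p : String) :
    pvPageStep st p =
      if PySem.Str.strip p = "" then st else pvStep st (PySem.Str.strip p) := by
  obtain ⟨pages, cur, len⟩ := st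
  by_cases h : PySem.Str.strip p = "" <;> simp [pvPageStep, pvStep, pvHtml, h]

theorem pvFoldA_eq (l : List String) (st : List String × String × Int) :
    l.foldl pvPageStep st =
      ((l.map PySem.Str.strip).filter (fun p => p ≠ "")).foldl pvStep st := by
  induction l generalizing st with
  | nil => rfl
  | cons p rest ih =>
    simp only [List.map_cons, List.foldl_cons, List.filter_cons]
    by_cases h : PySem.Str.strip p = ""
    · rw [pvPageStep_eq, if_pos h]; simp [h, ih]
    · rw [pvPageStep_eq, if_neg h]; simp [h, ih]

theorem pvMain (ps : List String) (pages : List String) (g : List String) (t : Int)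
    (hps : ∀ p ∈ ps, p ≠ "") (hg : g ≠ []) (ht : 1 ≤ t) :
    pvFin (ps.foldl pvStep (pages, pvRender g, t)) =
      pages ++ pvRender (g ++ ps.take (pvFit t ps)) :: pvPages (ps.drop (pvFit t ps)) := by
  induction ps generalizing pages g t with
  | nil =>
    simp [pvFit, pvFin, pvPages, pvRenderNeEmpty g hg]
  | cons p rest ih =>
    have hp : p ≠ "" := hps p (by simp)
    have hplen : 1 ≤ (p.length : Int) := by simpa using pvLenPos p hp
    rw [List.foldl_cons]
    by_cases hfit : t + (p.length : Int) ≤ 1200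
    · have hstep : pvStep (pages, pvRender g, t) p
          = (pages, pvRender (g ++ [p]), t + (p.length : Int)) := by
        rw [pvRenderAppend, pvRenderSingleton]
        simp only [pvStep, PySem.Str.len_eq, String.length_toList]
        rw [if_neg (by omega)]
      have hk : pvFit t (p :: rest) = pvFit (t + (p.length : Int)) rest + 1 := by
        simp only [pvFit, PySem.Str.len_eq, String.length_toList]
        rw [if_pos hfit]
        omega
      rw [hstep, ih pages (g ++ [p]) _ (fun q hq => hps q (by simp [hq])) (by simp) (by omega)]
      rw [hk, List.take_succ_cons, List.drop_succ_cons]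
      simp [List.append_assoc]
    · have hstep : pvStep (pages, pvRender g, t) p
          = (pages ++ [pvRender g], pvRender [p], (p.length : Int)) := by
        rw [pvRenderSingleton]
        simp only [pvStep, PySem.Str.len_eq, String.length_toList]
        rw [if_pos (by constructor <;> omega)]
      have hk : pvFit t (p :: rest) = 0 := by
        simp only [pvFit, PySem.Str.len_eq, String.length_toList]
        rw [if_neg hfit]
      rw [hstep, ih (pages ++ [pvRender g]) [p] _ (fun q hq => hps q (by simp [hq])) (by simp) hplen, hk]
      simp only [List.take_zero, List.drop_zero, List.append_nil, pvPages,
        PySem.Str.len_eq, String.length_toList]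
      simp

-- ===== VERDICT (by name: the statement is the Claim_ definition above) =====
theorem paginate_text_spec : Claim_equal_paginate_text := by
  intro text _
  unfold Spec_paginate_text paginate_text paginate_text_alt
  by_cases ht : text = ""
  · subst ht
    rw [if_pos rfl]
    rw [show ((((PySem.Str.split? "" "\n\n").getD []).map PySem.Str.strip).filter
        (fun p => p ≠ "")) = ([] : List String) from by decide]
    simp [pvPages]
  · rw [if_neg ht]
    set l := (PySem.Str.split? text "\n\n").getD [] with hl
    show pvFin (l.foldl pvPageStep ([], "", 0))
        = pvPages ((l.map PySem.Str.strip).filter (fun p => p ≠ ""))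
    rw [pvFoldA_eq]
    set ps := (l.map PySem.Str.strip).filter (fun p => p ≠ "") with hps
    have hmem : ∀ p ∈ ps, p ≠ "" := by
      intro p hpm
      have := List.of_mem_filter hpm
      simpa using this
    cases hq : ps with
    | nil => simp [pvFin, pvPages]
    | cons p rest =>
      have hp : p ≠ "" := hmem p (by rw [hq]; simp)
      have hplen : 1 ≤ (p.length : Int) := by simpa using pvLenPos p hp
      rw [List.foldl_cons]
      have hstep : pvStep ([], "", 0) p = ([], pvRender [p], (p.length : Int)) := by
        rw [pvRenderSingleton]
        simp only [pvStep, PySem.Str.len_eq, String.length_toList]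
        rw [if_neg (by omega)]
        simp
      rw [hstep, pvMain rest [] [p] _ (fun q hq' => hmem q (by rw [hq]; simp [hq'])) (by simp) hplen]
      simp only [pvPages, PySem.Str.len_eq, String.length_toList]
      simp
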